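-- pv_equiv track=rewrite | github.com/semyon-v-dot/ogg_vorbis | current_version/vorbis/helper_funcs.py | ilog
-- ===== SOURCE A (Python) =====
-- def ilog(x):
--     '''Function returns the position number of the highest set bit in the \
-- two’s complement integer value [x]'''
--     if x <= 0:
--         return 0
--
--     return_value = 0
--     while x > 0:
--         return_value += 1
--         x >>= 1
--
--     return return_value
-- ===== SOURCE B (Python) =====
-- def ilog(x):
--     return x.bit_length() if x > 0 else 0
-- ===== Notes on version B (the rewrite author's own statement) =====
-- stated objective: idiomatic
-- what changed: Replaces the shift-and-count loop with a direct call to int.bit_length(), computing the answer from the bit representation with no loop.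
import Mathlib
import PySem

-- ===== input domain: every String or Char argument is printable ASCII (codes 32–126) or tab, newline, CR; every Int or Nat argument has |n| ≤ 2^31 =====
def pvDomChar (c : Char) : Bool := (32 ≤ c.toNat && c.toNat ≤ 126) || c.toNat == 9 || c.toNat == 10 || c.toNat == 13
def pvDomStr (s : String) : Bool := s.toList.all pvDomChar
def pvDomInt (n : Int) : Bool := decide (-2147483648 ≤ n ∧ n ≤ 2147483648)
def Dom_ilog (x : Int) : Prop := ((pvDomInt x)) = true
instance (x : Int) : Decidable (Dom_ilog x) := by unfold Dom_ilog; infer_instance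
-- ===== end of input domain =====

-- B replaces A's shift-and-count loop with Python's int.bit_length() (no loop); same return value everywhere.

-- ===== PORT A =====
-- A's while-loop: rv += 1; x >>= 1 (for positive x, x >> 1 = x // 2)
def ilogLoop (x : Int) (rv : Int) : Int :=
  if h : 0 < x then ilogLoop (PySem.Int.floordiv x 2) (rv + 1) else rv
termination_by x.toNat
decreasing_by
  rw [PySem.Int.floordiv_eq_ediv_of_pos (by omega : (0:Int) < 2)]
  omega

def ilog (x : Int) : Int :=
  if x ≤ 0 then 0 else ilogLoop x 0

-- ===== PORT B =====
def ilog_alt (x : Int) : Int :=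
  if 0 < x then (PySem.Int.bitLength x : Int) else 0

-- ===== PRECONDITION & SPEC =====
def Spec_ilog (x : Int) (out : Int) : Prop := out = ilog_alt x
instance (x : Int) (out : Int) : Decidable (Spec_ilog x out) := by unfold Spec_ilog; infer_instance

-- ===== CLAIM (what is proved, stated in full; the proofs are below) =====
def Claim_equal_ilog : Prop := ∀ (x : Int), Dom_ilog x → Spec_ilog x (ilog x)

-- ===== LEMMAS AND PROOFS =====
theorem ilogLoop_eq (n : Nat) : ∀ (x rv : Int), x.toNat = n → 0 < x →
    ilogLoop x rv = rv + (PySem.Int.bitLength x : Int) := by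
  induction n using Nat.strong_induction_on with
  | _ n ih =>
    intro x rv hn hx
    rw [ilogLoop, dif_pos hx]
    have h2 : PySem.Int.floordiv x 2 = x / 2 :=
      PySem.Int.floordiv_eq_ediv_of_pos (by omega)
    rw [PySem.Int.bitLength_of_pos hx, h2]
    by_cases hy : 0 < x / 2
    · rw [ih (x / 2).toNat (by omega) (x / 2) (rv + 1) rfl hy]
      push_cast
      ring
    · have hx1 : x / 2 = 0 := by omega
      rw [hx1, ilogLoop, dif_neg (by omega)]
      simp [PySem.Int.bitLength_zero]

-- ===== VERDICT (by name: the statement is the Claim_ definition above) =====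
theorem ilog_spec : Claim_equal_ilog := by
  intro x _
  unfold Spec_ilog ilog ilog_alt
  by_cases hx : 0 < x
  · rw [if_neg (by omega), if_pos hx, ilogLoop_eq x.toNat x 0 rfl hx, zero_add]
  · rw [if_pos (by omega), if_neg hx]
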